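-- pv_equiv track=rewrite | github.com/iamyenachoi/Algorithm | 프로그래머스/0/120843. 공 던지기/공 던지기.py | solution
-- ===== SOURCE A (Python) =====
-- def solution(numbers, k):
--     answer = 0
--     index = 0
--     for i in range(k - 1):
--         index += 2
--         if index >= len(numbers):
--             index -= len(numbers)
--     answer = numbers[index]
--     return answer
-- ===== SOURCE B (Python) =====
-- def solution(numbers, k):
--     return numbers[2 * (k - 1) % len(numbers)]
-- ===== Notes on version B (the rewrite author's own statement) =====
-- stated objective: simpler
-- what changed: Replaces the O(k) simulation loop (step by 2, wrap by subtraction) with a single modular index computation numbers[2*(k-1) % len(numbers)].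
-- outside the precondition, e.g. on solution([5, 6, 7], 0): A returns 5, B returns 6; on solution([5], 3): A raises IndexError, B returns 5; on solution([], 1): A raises IndexError, B raises ZeroDivisionError
import Mathlib
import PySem

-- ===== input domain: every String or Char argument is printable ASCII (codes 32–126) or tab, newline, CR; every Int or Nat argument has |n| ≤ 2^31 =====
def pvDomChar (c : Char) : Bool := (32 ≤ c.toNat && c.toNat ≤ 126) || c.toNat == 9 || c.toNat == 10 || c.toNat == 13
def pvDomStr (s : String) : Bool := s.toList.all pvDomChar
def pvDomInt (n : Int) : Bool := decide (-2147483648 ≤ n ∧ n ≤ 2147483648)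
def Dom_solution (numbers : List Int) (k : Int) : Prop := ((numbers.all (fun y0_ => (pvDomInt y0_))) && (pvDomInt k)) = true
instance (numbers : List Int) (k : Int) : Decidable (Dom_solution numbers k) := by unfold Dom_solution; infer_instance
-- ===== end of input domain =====

-- B replaces A's step-and-wrap simulation loop by a single modular index computation; equivalence is claimed on the inputs stated in Pre_solution.

-- ===== PORT A =====
def solution (numbers : List Int) (k : Int) : Int :=
  let index : Int := (PySem.List.pyRange 0 (k - 1) 1).foldl
    (fun index _ =>
      let index := index + 2
      if index ≥ (numbers.length : Int) then index - (numbers.length : Int) else index) 0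
  -- numbers[index]; Pre_solution guarantees the index is in range (no IndexError)
  (PySem.List.pyGet? numbers index).getD 0

-- ===== PORT B =====
def solution_alt (numbers : List Int) (k : Int) : Int :=
  -- numbers[2 * (k - 1) % len(numbers)]; Pre_solution guarantees a nonempty list
  (PySem.List.pyGet? numbers (PySem.Int.mod (2 * (k - 1)) (numbers.length : Int))).getD 0

-- ===== PRECONDITION & SPEC =====
-- Pre_ excludes: the empty list and one-element lists with k ≥ 2, on which A raises IndexError
-- (its wrap-by-one-subtraction lets the index drift out of range); and the non-positive k
-- (outside the task's natural domain: k counts throws, k ≥ 1) on which A's numbers[0] from the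
-- unexecuted loop and B's negative-k modular index disagree, i.e. where len(numbers) does not
-- divide 2*(k-1).
def Pre_solution (numbers : List Int) (k : Int) : Prop :=
  1 ≤ numbers.length ∧ (numbers.length = 1 → k ≤ 1) ∧ (k ≤ 0 → (numbers.length : Int) ∣ 2 * (k - 1))
instance (numbers : List Int) (k : Int) : Decidable (Pre_solution numbers k) := by
  unfold Pre_solution; infer_instance
def pvWitness_solution : List Int × Int := ([1, 2, 3], 5)

def Spec_solution (numbers : List Int) (k : Int) (out : Int) : Prop := out = solution_alt numbers k
instance (numbers : List Int) (k : Int) (out : Int) : Decidable (Spec_solution numbers k out) := by unfold Spec_solution; infer_instance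

-- ===== CLAIM (what is proved, stated in full; the proofs are below) =====
def Claim_equal_solution : Prop := ∀ (numbers : List Int) (k : Int), Dom_solution numbers k → Pre_solution numbers k → Spec_solution numbers k (solution numbers k)

-- ===== LEMMAS AND PROOFS =====

-- a foldl whose body ignores the element iterates its state function
theorem foldl_const_iterate {α σ : Type} (g : σ → σ) :
    ∀ (l : List α) (s : σ), l.foldl (fun x _ => g x) s = g^[l.length] s := by
  intro l
  induction l with
  | nil => intro s; rfl
  | cons a t ih =>
      intro s
      simp [List.foldl_cons, ih, Function.iterate_succ_apply]

-- the loop body keeps the state equal to the running index modulo L (L ≥ 2)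
theorem iterate_step_emod (L : Int) (hL : 2 ≤ L) :
    ∀ (n : Nat) (s : Int), 0 ≤ s → s < L →
      (fun x : Int => if x + 2 ≥ L then x + 2 - L else x + 2)^[n] s = (s + 2 * n) % L := by
  intro n
  induction n with
  | zero =>
      intro s h0 h1
      simp [Int.emod_eq_of_lt h0 h1]
  | succ m ih =>
      intro s h0 h1
      rw [Function.iterate_succ_apply]
      by_cases h : s + 2 ≥ L
      · simp only [if_pos h]
        rw [ih (s + 2 - L) (by omega) (by omega)]
        have h2 : s + 2 * ((((m : Nat) + 1 : Nat)) : Int) = (s + 2 - L + 2 * m) + L * 1 := by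
          push_cast; ring
        rw [h2, Int.add_mul_emod_self_left]
      · simp only [if_neg h]
        rw [ih (s + 2) (by omega) (by omega)]
        congr 1; push_cast; ring

theorem solution_spec : Claim_equal_solution := by
  intro numbers k _ hpre
  obtain ⟨hlen, h1, hdvd⟩ := hpre
  by_cases hk : 1 ≤ k
  case neg =>
    -- k ≤ 0: the loop is empty, A reads numbers[0]; B's modulus is 0 by the divisibility clause
    have hLpos : (0 : Int) < (numbers.length : Int) := by exact_mod_cast hlen
    have h0 : PySem.Int.mod (2 * (k - 1)) (numbers.length : Int) = 0 := by
      rw [PySem.Int.mod_eq_emod_of_pos hLpos]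
      exact Int.emod_eq_zero_of_dvd (hdvd (by omega))
    simp [Spec_solution, solution, solution_alt, h0, PySem.List.pyRange_one_eq_nil (show k - 1 ≤ 0 by omega)]
  case pos =>
    have hLpos : (0 : Int) < (numbers.length : Int) := by exact_mod_cast hlen
    simp only [Spec_solution, solution, solution_alt, PySem.Int.mod_eq_emod_of_pos hLpos]
    have hbody : (fun (index : Int) (_ : Int) =>
        let index := index + 2
        if index ≥ (numbers.length : Int) then index - (numbers.length : Int) else index)
        = (fun x _ => (fun x : Int => if x + 2 ≥ (numbers.length : Int) then x + 2 - (numbers.length : Int) else x + 2) x) := by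
      funext x y; simp
    rw [hbody, foldl_const_iterate]
    by_cases hL2 : 2 ≤ (numbers.length : Int)
    · rw [iterate_step_emod _ hL2 _ 0 le_rfl hLpos]
      congr 2
      have hlenr : ((PySem.List.pyRange 0 (k - 1) 1).length : Int) = k - 1 := by
        rw [PySem.List.length_pyRange_one]; omega
      rw [hlenr]; ring_nf
    · -- numbers.length = 1, hence k = 1: the loop is empty and 2*(k-1) % 1 = 0
      have hlen1 : numbers.length = 1 := by omega
      have hk1 : k = 1 := by have := h1 hlen1; omega
      subst hk1
      simp [PySem.List.pyRange_one_eq_nil, hlen1]
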